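-- pv_equiv track=rewrite | github.com/mdebono/advent-of-code | 2022/06/part2.py | is_marker
-- ===== SOURCE A (Python) =====
-- def is_marker(quartet):
--     dict = {}
--     for x in quartet:
--         if dict.get(x):
--             dict[x] += 1
--             if dict[x] > 1:
--                 return False
--         else:
--             dict[x] = 1
--     return True
-- ===== SOURCE B (Python) =====
-- def is_marker(quartet):
--     chars = list(quartet)
--     n = len(chars)
--     for i in range(n):
--         for j in range(i + 1, n):
--             if chars[i] == chars[j]:
--                 return False
--     return True
-- ===== Notes on version B (the rewrite author's own statement) =====
-- stated objective: alternative
-- what changed: Replaces the dict-counting single pass with a nested pairwise scan that compares each character against all later ones and keeps no auxiliary structure.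
import Mathlib
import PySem

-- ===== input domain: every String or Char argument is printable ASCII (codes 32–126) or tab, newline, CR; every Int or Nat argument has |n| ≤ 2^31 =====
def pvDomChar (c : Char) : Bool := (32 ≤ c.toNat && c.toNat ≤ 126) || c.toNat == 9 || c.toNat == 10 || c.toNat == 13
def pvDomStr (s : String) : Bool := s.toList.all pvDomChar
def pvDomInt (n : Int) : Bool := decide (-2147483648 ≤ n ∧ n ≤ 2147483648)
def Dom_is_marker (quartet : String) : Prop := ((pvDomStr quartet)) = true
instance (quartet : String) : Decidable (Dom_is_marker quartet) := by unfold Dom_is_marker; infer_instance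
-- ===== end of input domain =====

-- B replaces A's dict-counting pass by a pairwise nested scan (no auxiliary structure); same result, similar cost (alternative).


-- ===== PORT A =====
-- the for-loop over the string's characters with the dict accumulator
def isMarkerLoopA : List Char → PySem.Dict Char Int → Bool
  | [], _ => true
  | x :: xs, d =>
    match d.get? x with
    | some v =>
      if v ≠ 0 then        -- 'if dict.get(x):' truthy
        let d' := d.insert x (v + 1)   -- dict[x] += 1
        -- 'dict[x]' read back; the key was just inserted so KeyError is impossible, getD is exact
        if d'.getD x 0 > 1 then false else isMarkerLoopA xs d'
      else
        isMarkerLoopA xs (d.insert x 1)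
    | none => isMarkerLoopA xs (d.insert x 1)

def is_marker (quartet : String) : Bool :=
  isMarkerLoopA quartet.toList PySem.Dict.empty

-- ===== PORT B =====
-- inner loop: does c occur among the later characters ys?
def laterScan (c : Char) : List Char → Bool
  | [] => false
  | y :: ys => if c = y then true else laterScan c ys

-- outer loop over positions i, scanning j > i
def pairScan : List Char → Bool
  | [] => true
  | x :: xs => if laterScan x xs then false else pairScan xs

def is_marker_alt (quartet : String) : Bool :=
  pairScan quartet.toList

-- ===== PRECONDITION & SPEC =====
def Spec_is_marker (quartet : String) (out : Bool) : Prop := out = is_marker_alt quartet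
instance (quartet : String) (out : Bool) : Decidable (Spec_is_marker quartet out) := by unfold Spec_is_marker; infer_instance

-- ===== CLAIM (what is proved, stated in full; the proofs are below) =====
def Claim_equal_is_marker : Prop := ∀ (quartet : String), Dom_is_marker quartet → Spec_is_marker quartet (is_marker quartet)

-- ===== LEMMAS AND PROOFS =====
theorem laterScan_iff (c : Char) (xs : List Char) : laterScan c xs = true ↔ c ∈ xs := by
  induction xs with
  | nil => simp [laterScan]
  | cons y ys ih => by_cases h : c = y <;> simp [laterScan, h, ih]

theorem pairScan_iff (xs : List Char) : pairScan xs = true ↔ xs.Nodup := by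
  induction xs with
  | nil => simp [pairScan]
  | cons x xs ih =>
    by_cases h : laterScan x xs = true
    · simp [pairScan, h, (laterScan_iff x xs).mp h]
    · have hx : x ∉ xs := fun hm => h ((laterScan_iff x xs).mpr hm)
      simp [pairScan, h, hx, ih]

theorem loopA_iff (xs : List Char) : ∀ (d : PySem.Dict Char Int),
    (∀ c v, d.get? c = some v → v = 1) →
    (isMarkerLoopA xs d = true ↔ (∀ c ∈ xs, d.get? c = none) ∧ xs.Nodup) := by
  induction xs with
  | nil => intro d _; simp [isMarkerLoopA]
  | cons x xs ih =>
    intro d hd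
    cases hx : d.get? x with
    | some v =>
      have hv : v = 1 := hd x v hx
      subst hv
      have : isMarkerLoopA (x :: xs) d = false := by
        simp [isMarkerLoopA, hx, PySem.Dict.getD_insert_self]
      simp [this, hx]
    | none =>
      have hstep : isMarkerLoopA (x :: xs) d = isMarkerLoopA xs (d.insert x 1) := by
        simp [isMarkerLoopA, hx]
      have hinv : ∀ c v, (d.insert x 1).get? c = some v → v = 1 := by
        intro c v h
        rw [PySem.Dict.get?_insert] at h
        split at h
        · exact (Option.some.injEq _ _ ▸ h).symm ▸ (by injection h with h'; omega)
        · exact hd c v h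
      rw [hstep, ih (d.insert x 1) hinv, List.nodup_cons]
      constructor
      · rintro ⟨h1, h2⟩
        have hxn : x ∉ xs := by
          intro hm
          have := h1 x hm
          rw [PySem.Dict.get?_insert] at this
          simp at this
        refine ⟨?_, hxn, h2⟩
        intro c hc
        rcases List.mem_cons.mp hc with hc | hc
        · exact hc ▸ hx
        · have := h1 c hc
          rw [PySem.Dict.get?_insert] at this
          split at this
          · simp at this
          · exact this
      · rintro ⟨h1, hxn, h2⟩
        refine ⟨?_, h2⟩
        intro c hc
        rw [PySem.Dict.get?_insert]
        split
        · exact absurd (‹c = x› ▸ hc) (by intro h; exact hxn (‹c = x› ▸ hc))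
        · exact h1 c (List.mem_cons_of_mem _ hc)

-- ===== VERDICT (by name: the statement is the Claim_ definition above) =====
theorem is_marker_spec : Claim_equal_is_marker := by
  intro q _
  unfold Spec_is_marker is_marker is_marker_alt
  rw [Bool.eq_iff_iff]
  rw [loopA_iff q.toList PySem.Dict.empty (by intro c v h; simp [PySem.Dict.get?_empty] at h)]
  rw [pairScan_iff]
  simp [PySem.Dict.get?_empty]
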